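-- pv_equiv track=rewrite | github.com/LayzaDev/Python | 04-Listas-Python-PC/Lista02/lista02_07.py | contagem_de_cada_item
-- ===== SOURCE A (Python) =====
-- def contagem_de_cada_item(lista: list):
--     """
--     Conta a frequência de cada número na lista e formata os resultados.
--
--     Args:
--     lista (list): Lista de números inteiros.
--
--     Return:
--     str: Contagem de ocorrências de cada item da lista fornatados linha a linha.
--     """
--     contagem = {}
--     lista_2 = []
--     for item in lista:
--         if item in contagem:
--             contagem[item] += 1
--         else:
--             contagem[item] = 1
--     for item in sorted(contagem):
--         lista_2.append(f"{item}: {contagem[item]}x")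
--     return "\n".join(lista_2)
-- ===== SOURCE B (Python) =====
-- def contagem_de_cada_item(lista: list):
--     """Run-length scan of the sorted list: sort once, then walk the sorted
--     copy grouping consecutive equal elements; no frequency dict at all."""
--     s = sorted(lista)
--     linhas = []
--     i, n = 0, len(s)
--     while i < n:
--         x = s[i]
--         j = i + 1
--         while j < n and s[j] == x:
--             j += 1
--         linhas.append(f"{x}: {j - i}x")
--         i = j
--     return "\n".join(linhas)
-- ===== Notes on version B (the rewrite author's own statement) =====
-- stated objective: alternative
-- what changed: B drops the frequency dict entirely: it sorts the whole list once and does a single run-length scan over the sorted copy, emitting one line per run of consecutive equal elements, instead of A's dict-counting pass followed by sorting the keys.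
import Mathlib
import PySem

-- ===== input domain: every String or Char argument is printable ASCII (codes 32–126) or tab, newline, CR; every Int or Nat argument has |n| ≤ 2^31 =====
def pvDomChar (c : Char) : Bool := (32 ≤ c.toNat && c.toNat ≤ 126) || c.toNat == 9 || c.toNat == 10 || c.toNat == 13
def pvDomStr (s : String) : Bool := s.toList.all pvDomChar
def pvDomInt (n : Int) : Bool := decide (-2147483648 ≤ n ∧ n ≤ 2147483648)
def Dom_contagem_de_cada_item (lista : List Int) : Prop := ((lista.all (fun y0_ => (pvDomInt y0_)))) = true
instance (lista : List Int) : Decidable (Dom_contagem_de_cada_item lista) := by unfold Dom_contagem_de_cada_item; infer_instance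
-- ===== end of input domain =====

-- B replaces A's frequency dict + key sort by one sort of the whole list followed by a
-- run-length scan grouping consecutive equal elements (alternative algorithm, same value).

-- ===== PORT A =====
def contagem_de_cada_item (lista : List Int) : String :=
  -- contagem = {}; for item in lista: if item in contagem: contagem[item] += 1 else: contagem[item] = 1
  let contagem := lista.foldl
    (fun d item => if d.contains item then d.modify item 0 (· + 1) else d.insert item 1)
    (PySem.Dict.empty : PySem.Dict Int Int)
  -- lista_2 = []; for item in sorted(contagem): lista_2.append(f"{item}: {contagem[item]}x")
  -- contagem[item] is exact as getD: every iterated item is a key of contagem, so no KeyError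
  let lista_2 := (PySem.List.sorted contagem.keys (fun x => x) false).foldl
    (fun acc item => acc ++ [PySem.Int.toStr item ++ ": " ++ PySem.Int.toStr (contagem.getD item 0) ++ "x"])
    ([] : List String)
  PySem.Str.join "\n" lista_2

-- ===== PORT B =====
-- the outer 'while i < n:' loop of Source B on the suffix s[i:]; the inner index loop counting
-- the run of elements equal to x = s[i] is the takeWhile over the tail, and 'i = j' advances
-- to that run's dropWhile
def pvGroupLines : List Int → List String
  | [] => []
  | x :: xs =>
      (PySem.Int.toStr x ++ ": " ++ PySem.Int.toStr (((xs.takeWhile (· == x)).length : Int) + 1) ++ "x")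
        :: pvGroupLines (xs.dropWhile (· == x))
termination_by s => s.length
decreasing_by
  exact Nat.lt_succ_of_le (List.length_dropWhile_le _ _)

def contagem_de_cada_item_alt (lista : List Int) : String :=
  PySem.Str.join "\n" (pvGroupLines (PySem.List.sorted lista (fun x => x) false))

-- ===== PRECONDITION & SPEC =====
def Spec_contagem_de_cada_item (lista : List Int) (out : String) : Prop := out = contagem_de_cada_item_alt lista
instance (lista : List Int) (out : String) : Decidable (Spec_contagem_de_cada_item lista out) := by unfold Spec_contagem_de_cada_item; infer_instance

-- ===== CLAIM (what is proved, stated in full; the proofs are below) =====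
def Claim_equal_contagem_de_cada_item : Prop := ∀ (lista : List Int), Dom_contagem_de_cada_item lista → Spec_contagem_de_cada_item lista (contagem_de_cada_item lista)

-- ===== LEMMAS AND PROOFS =====

-- the run heads of a list (first element of every maximal run of equal elements)
def pvHeads : List Int → List Int
  | [] => []
  | x :: xs => x :: pvHeads (xs.dropWhile (· == x))
termination_by s => s.length
decreasing_by
  exact Nat.lt_succ_of_le (List.length_dropWhile_le _ _)

-- A's counting loop is exactly collections.Counter: both branches are one modify step.
theorem contagem_eq_counter (lista : List Int) :
    lista.foldl
      (fun d item => if d.contains item then d.modify item 0 (· + 1) else d.insert item 1)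
      (PySem.Dict.empty : PySem.Dict Int Int) = PySem.Dict.counter lista := by
  rw [PySem.Dict.counter_eq_foldl]
  congr 1
  funext d item
  by_cases h : d.contains item
  · simp [h]
  · simp only [h, Bool.false_eq_true, if_false, PySem.Dict.modify]
    rw [PySem.Dict.getD_of_not_contains _ _ (by simpa using h)]
    norm_num

-- in a sorted list, everything after the leading run of x is strictly above x
theorem lt_of_mem_dropWhile (x : Int) (xs : List Int)
    (hs : xs.Pairwise (· ≤ ·)) (hx : ∀ y ∈ xs, x ≤ y) :
    ∀ y ∈ xs.dropWhile (· == x), x < y := by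
  induction xs with
  | nil => simp
  | cons h t ih =>
    by_cases hh : h = x
    · subst hh
      rw [List.dropWhile_cons_of_pos (by simp)]
      exact ih hs.of_cons (fun y hy => hx y (List.mem_cons_of_mem _ hy))
    · rw [List.dropWhile_cons_of_neg (by simpa using hh)]
      intro y hy
      rcases List.mem_cons.mp hy with rfl | hy
      · exact lt_of_le_of_ne (hx y (List.mem_cons_self)) (Ne.symm hh)
      · exact lt_of_lt_of_le
          (lt_of_le_of_ne (hx h (List.mem_cons_self)) (Ne.symm hh))
          (List.rel_of_pairwise_cons hs hy)

theorem pvHeads_subset (s : List Int) : ∀ y ∈ pvHeads s, y ∈ s := by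
  induction s using pvHeads.induct with
  | case1 => simp [pvHeads]
  | case2 x xs ih =>
    intro y hy
    rw [pvHeads] at hy
    rcases List.mem_cons.mp hy with rfl | hy
    · exact List.mem_cons_self
    · exact List.mem_cons_of_mem _ ((xs.dropWhile_sublist (· == x)).mem (ih y hy))

theorem mem_pvHeads_of_mem (s : List Int) (hs : s.Pairwise (· ≤ ·)) :
    ∀ y ∈ s, y ∈ pvHeads s := by
  induction s using pvHeads.induct with
  | case1 => simp
  | case2 x xs ih =>
    intro y hy
    rw [pvHeads]
    rcases List.mem_cons.mp hy with rfl | hy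
    · exact List.mem_cons_self
    · by_cases hd : y ∈ xs.dropWhile (· == x)
      · exact List.mem_cons_of_mem _
          (ih (hs.of_cons.sublist (xs.dropWhile_sublist (· == x))) y hd)
      · -- y sits in the leading run, hence y = x
        have : y ∈ xs.takeWhile (· == x) := by
          have := xs.takeWhile_append_dropWhile (p := (· == x))
          rw [← this] at hy
          rcases List.mem_append.mp hy with h | h
          · exact h
          · exact absurd h hd
        have := List.mem_takeWhile_imp this
        simp_all

theorem pvHeads_pairwise_lt (s : List Int) (hs : s.Pairwise (· ≤ ·)) :
    (pvHeads s).Pairwise (· < ·) := by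
  induction s using pvHeads.induct with
  | case1 => simp [pvHeads]
  | case2 x xs ih =>
    rw [pvHeads]
    have hrest : (xs.dropWhile (· == x)).Pairwise (· ≤ ·) :=
      hs.of_cons.sublist (xs.dropWhile_sublist (· == x))
    refine List.pairwise_cons.mpr ⟨?_, ih hrest⟩
    intro y hy
    exact lt_of_mem_dropWhile x xs hs.of_cons
      (fun z hz => List.rel_of_pairwise_cons hs hz) y
      (pvHeads_subset _ y hy)

-- the run-length scan over a sorted list, expressed per distinct head with global counts
theorem pvGroupLines_eq_map (s : List Int) (hs : s.Pairwise (· ≤ ·)) :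
    pvGroupLines s = (pvHeads s).map
      (fun k => PySem.Int.toStr k ++ ": " ++ PySem.Int.toStr ((s.count k : Int)) ++ "x") := by
  induction s using pvHeads.induct with
  | case1 => simp [pvGroupLines, pvHeads]
  | case2 x xs ih =>
    have hxle : ∀ z ∈ xs, x ≤ z := fun z hz => List.rel_of_pairwise_cons hs hz
    have hrest : (xs.dropWhile (· == x)).Pairwise (· ≤ ·) :=
      hs.of_cons.sublist (xs.dropWhile_sublist (· == x))
    have hgt : ∀ y ∈ xs.dropWhile (· == x), x < y :=
      lt_of_mem_dropWhile x xs hs.of_cons hxle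
    rw [pvGroupLines, pvHeads, List.map_cons, ih hrest]
    have hsplit : xs = xs.takeWhile (· == x) ++ xs.dropWhile (· == x) :=
      (xs.takeWhile_append_dropWhile (p := (· == x))).symm
    congr 1
    · -- head line: the run length is the global count of x
      have h1 : (xs.takeWhile (· == x)).count x = (xs.takeWhile (· == x)).length := by
        rw [List.count_eq_length]
        intro b hb
        have hbx := List.mem_takeWhile_imp hb
        simp only [beq_iff_eq] at hbx
        exact hbx.symm
      have h2 : (xs.dropWhile (· == x)).count x = 0 := by
        rw [List.count_eq_zero]
        intro h
        exact absurd rfl (ne_of_gt (hgt x h))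
      have : (x :: xs).count x = (xs.takeWhile (· == x)).length + 1 := by
        rw [List.count_cons_self]
        conv_lhs => rw [hsplit]
        rw [List.count_append, h1, h2]
      rw [this]
      push_cast
      ring_nf
    · -- tail lines: heads of the rest are > x, so their global count equals the rest count
      apply List.map_congr_left
      intro k hk
      have hkx : x < k := hgt k (pvHeads_subset _ k hk)
      have h1 : (xs.takeWhile (· == x)).count k = 0 := by
        rw [List.count_eq_zero]
        intro h
        have hkx' := List.mem_takeWhile_imp h
        simp only [beq_iff_eq] at hkx'
        exact (ne_of_gt hkx) hkx'
      have : (x :: xs).count k = (xs.dropWhile (· == x)).count k := by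
        rw [List.count_cons_of_ne (ne_of_gt hkx).symm]
        conv_lhs => rw [hsplit]
        rw [List.count_append, h1, Nat.zero_add]
      rw [this]

-- the run heads of the sorted list ARE A's sorted distinct keys
theorem pvHeads_sorted_eq (lista : List Int) :
    pvHeads (PySem.List.sorted lista (fun x => x) false) =
      PySem.List.sorted (PySem.Set.ofList lista) (fun x => x) false := by
  have hs : (PySem.List.sorted lista (fun x => x) false).Pairwise (· ≤ ·) := by
    simpa using PySem.List.sorted_pairwise (xs := lista) (key := fun x => x)
  have hlt := pvHeads_pairwise_lt _ hs
  have hnd1 : (pvHeads (PySem.List.sorted lista (fun x => x) false)).Nodup :=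
    hlt.imp ne_of_lt
  have hnd2 : (PySem.List.sorted (PySem.Set.ofList lista) (fun x => x) false).Nodup :=
    ((PySem.List.sorted_perm _ _ _).nodup_iff).mpr (PySem.Set.nodup_ofList lista)
  have hmem : ∀ a : Int,
      a ∈ pvHeads (PySem.List.sorted lista (fun x => x) false) ↔
      a ∈ PySem.List.sorted (PySem.Set.ofList lista) (fun x => x) false := by
    intro a
    rw [PySem.List.mem_sorted, PySem.Set.mem_ofList]
    constructor
    · intro h
      have := pvHeads_subset _ a h
      rwa [PySem.List.mem_sorted] at this
    · intro h
      exact mem_pvHeads_of_mem _ hs a (by rwa [PySem.List.mem_sorted])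
  have hperm : (pvHeads (PySem.List.sorted lista (fun x => x) false)).Perm
      (PySem.List.sorted (PySem.Set.ofList lista) (fun x => x) false) :=
    (List.perm_ext_iff_of_nodup hnd1 hnd2).mpr hmem
  exact PySem.List.eq_of_perm_of_pairwise_le_of_injective (fun x => x)
    (fun _ _ h => h) hperm (by simpa using hlt.imp le_of_lt)
    (by simpa using PySem.List.sorted_pairwise (xs := PySem.Set.ofList lista) (key := fun x => x))

theorem contagem_de_cada_item_spec : Claim_equal_contagem_de_cada_item := by
  intro lista _
  unfold Spec_contagem_de_cada_item contagem_de_cada_item contagem_de_cada_item_alt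
  rw [contagem_eq_counter]
  simp only [PySem.List.foldl_append_singleton_eq_map, PySem.Dict.keys_counter,
    PySem.Dict.getD_counter, List.nil_append]
  rw [pvGroupLines_eq_map _ (by simpa using PySem.List.sorted_pairwise (xs := lista) (key := fun x => x)),
    pvHeads_sorted_eq]
  congr 1
  apply List.map_congr_left
  intro k _
  rw [List.Perm.count_eq (PySem.List.sorted_perm lista (fun x => x) false)]
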